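-- pv_equiv track=rewrite | github.com/sanjjithd279/Chess-project-with-ai-engine | Chess/RookMagicBitboard.py | rook_occupancy_mask
-- ===== SOURCE A (Python) =====
-- def rook_occupancy_mask(square):
--     rank = square // 8
--     file = square % 8
--     mask = 0
--
--     # Horizontal mask (rank)
--     for i in range(8):
--         if i != file:
--             mask |= (1 << (rank * 8 + i))
--
--     # Vertical mask (file)
--     for i in range(8):
--         if i != rank:
--             mask |= (1 << (i * 8 + file))
--
--     return mask
-- ===== SOURCE B (Python) =====
-- def rook_occupancy_mask(square):
--     rank, file = divmod(square, 8)
--     full_rank = 0xFF << (rank * 8)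
--     full_file = 0x0101010101010101 << file
--     return (full_rank | full_file) & ~(1 << square)
-- ===== Notes on version B (the rewrite author's own statement) =====
-- stated objective: idiomatic
-- what changed: Replaces the two bit-setting loops by a closed-form bitboard expression: the full-rank and full-file mask constants are shifted into place, OR-ed together, and the square's own bit is cleared with a complement mask.
import Mathlib
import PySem

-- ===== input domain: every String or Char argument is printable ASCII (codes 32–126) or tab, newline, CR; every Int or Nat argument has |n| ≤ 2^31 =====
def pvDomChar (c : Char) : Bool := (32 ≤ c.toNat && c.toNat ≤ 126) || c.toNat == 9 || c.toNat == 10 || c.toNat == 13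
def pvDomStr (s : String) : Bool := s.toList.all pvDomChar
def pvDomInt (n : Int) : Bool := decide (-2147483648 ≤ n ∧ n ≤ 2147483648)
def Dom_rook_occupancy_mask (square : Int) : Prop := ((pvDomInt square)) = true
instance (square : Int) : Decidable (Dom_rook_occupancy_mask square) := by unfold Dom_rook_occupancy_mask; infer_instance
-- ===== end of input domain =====

-- B replaces A's two 8-step bit-setting loops by a closed-form mask expression
-- (full rank OR full file, own bit cleared); equal on every square ≥ 0 (both raise on square < 0).

-- ===== PORT A =====
-- Python's `1 << k` raises ValueError for k < 0; Pre_ restricts to 0 ≤ square,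
-- where every shift amount is ≥ 0, so `.toNat` on the shift amounts is exact.
def rook_occupancy_mask (square : Int) : Int :=
  let rank := PySem.Int.floordiv square 8
  let file := PySem.Int.mod square 8
  let mask : Int := 0
  let mask := (List.range 8).foldl (fun (m : Int) (i : Nat) =>
      if (i : Int) ≠ file then PySem.Int.bor m ((1 : Int) <<< (rank * 8 + (i : Int)).toNat) else m) mask
  let mask := (List.range 8).foldl (fun (m : Int) (i : Nat) =>
      if (i : Int) ≠ rank then PySem.Int.bor m ((1 : Int) <<< ((i : Int) * 8 + file).toNat) else m) mask
  mask

-- ===== PORT B =====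
-- Python's `~x` is Int.not; `1 << square` needs square ≥ 0 (Pre_), so `.toNat` is exact.
def rook_occupancy_mask_alt (square : Int) : Int :=
  let rank := PySem.Int.floordiv square 8
  let file := PySem.Int.mod square 8
  let full_rank := (0xFF : Int) <<< (rank * 8).toNat
  let full_file := (0x0101010101010101 : Int) <<< file.toNat
  PySem.Int.band (PySem.Int.bor full_rank full_file) (Int.not ((1 : Int) <<< square.toNat))

-- ===== PRECONDITION & SPEC =====
-- Pre_ excludes exactly the squares < 0, on which both Pythons raise ValueError (negative shift).
def Pre_rook_occupancy_mask (square : Int) : Prop := 0 ≤ square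
instance (square : Int) : Decidable (Pre_rook_occupancy_mask square) := by unfold Pre_rook_occupancy_mask; infer_instance
def pvWitness_rook_occupancy_mask : Int := 27

def Spec_rook_occupancy_mask (square : Int) (out : Int) : Prop := out = rook_occupancy_mask_alt square
instance (square : Int) (out : Int) : Decidable (Spec_rook_occupancy_mask square out) := by unfold Spec_rook_occupancy_mask; infer_instance

-- ===== CLAIM (what is proved, stated in full; the proofs are below) =====
def Claim_equal_rook_occupancy_mask : Prop := ∀ (square : Int), Dom_rook_occupancy_mask square → Pre_rook_occupancy_mask square → Spec_rook_occupancy_mask square (rook_occupancy_mask square)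

-- ===== LEMMAS AND PROOFS =====

-- Nat-level images of the two ports (used only by the proofs below).
def pvA (r f : Nat) : Nat :=
  (List.range 8).foldl (fun m i => if i ≠ r then m ||| (1 <<< (i * 8 + f)) else m)
    ((List.range 8).foldl (fun m i => if i ≠ f then m ||| (1 <<< (r * 8 + i)) else m) 0)

def pvX (r f : Nat) : Nat := (255 <<< (r * 8)) ||| (0x0101010101010101 <<< f)

-- bit characterisations of the constants
theorem pv255 (m : Nat) : (255 : Nat).testBit m = decide (m < 8) := by
  by_cases h : m < 8
  · interval_cases m <;> decide
  · rw [Nat.testBit_eq_false_of_lt (by calc (255 : Nat) < 2 ^ 8 := by norm_num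
        _ ≤ 2 ^ m := Nat.pow_le_pow_right (by norm_num) (by omega))]
    simp; omega

theorem pvC (m : Nat) : (0x0101010101010101 : Nat).testBit m = decide (m ≤ 56 ∧ m % 8 = 0) := by
  by_cases h : m < 64
  · interval_cases m <;> decide
  · rw [Nat.testBit_eq_false_of_lt (by calc (0x0101010101010101 : Nat) < 2 ^ 64 := by norm_num
        _ ≤ 2 ^ m := Nat.pow_le_pow_right (by norm_num) (by omega))]
    simp; omega

theorem pv1 (m : Nat) : (1 : Nat).testBit m = decide (m = 0) := by
  rw [show (1 : Nat) = 2 ^ 0 from rfl, Nat.testBit_two_pow]; simp [eq_comm]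

-- disjoint OR is addition
theorem pv_or_add : ∀ (a b : Nat), a &&& b = 0 → a ||| b = a + b := by
  intro a
  induction a using Nat.binaryRec with
  | zero => intro b _; simp
  | bit c a ih =>
    intro b h
    rw [← Nat.bit_bodd_div2 b, Nat.lor_bit]
    rw [← Nat.bit_bodd_div2 b, Nat.land_bit] at h
    have h0 : (c && b.bodd) = false ∧ a &&& b.div2 = 0 := by
      rcases hcb : (c && b.bodd) <;> rcases hv : a &&& b.div2 <;>
        simp [Nat.bit, hcb, hv] at h ⊢
    have := ih b.div2 h0.2
    conv_rhs => rw [← Nat.bit_bodd_div2 b]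
    rcases hc : c <;> rcases hb : b.bodd <;> simp_all [Nat.bit] <;> omega

-- a shifted value is disjoint from anything below the shift
theorem pv_shift_and_eq_zero (c k s : Nat) (hs : s < 2 ^ k) : (c <<< k) &&& s = 0 := by
  apply Nat.zero_of_testBit_eq_false
  intro j
  rw [Nat.testBit_land]
  by_cases h : k ≤ j
  · rw [Nat.testBit_eq_false_of_lt (lt_of_lt_of_le hs (Nat.pow_le_pow_right (by norm_num) h))]
    simp
  · rw [Nat.testBit_shiftLeft]
    simp only [ge_iff_le, h, decide_false, Bool.false_and]

-- one OR-step of the first loop factors through the rank shift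
theorem pv_step2 (c a k : Nat) : (c <<< k) ||| (1 <<< (k + a)) = (c ||| (1 <<< a)) <<< k := by
  apply Nat.eq_of_testBit_eq
  intro j
  rw [Bool.eq_iff_iff]
  simp only [Nat.testBit_lor, Nat.testBit_shiftLeft, pv1, Bool.or_eq_true, Bool.and_eq_true,
    decide_eq_true_eq, ge_iff_le]
  by_cases hcb : c.testBit (j - k) = true <;> simp [hcb] <;> omega

-- the whole first loop factors through the rank shift
theorem pv_rowfold (l : List Nat) (f r : Nat) : ∀ c : Nat,
    l.foldl (fun m i => if i ≠ f then m ||| (1 <<< (r * 8 + i)) else m) (c <<< (r * 8))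
      = (l.foldl (fun m i => if i ≠ f then m ||| (1 <<< i) else m) c) <<< (r * 8) := by
  induction l with
  | nil => intro c; rfl
  | cons a l ih =>
    intro c
    simp only [List.foldl]
    by_cases h : a = f
    · rw [if_neg (by simp [h]), if_neg (by simp [h])]; exact ih c
    · rw [if_pos h, if_pos h, pv_step2]; exact ih _

-- an OR-fold over any start value splits off the start value
theorem pv_foldl_or_init (l : List Nat) (F : Nat → Nat) : ∀ a : Nat,
    l.foldl (fun m i => m ||| F i) a = a ||| l.foldl (fun m i => m ||| F i) 0 := by
  induction l with
  | nil => intro a; simp [List.foldl]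
  | cons b l ih =>
    intro a
    simp only [List.foldl]
    rw [ih (a ||| F b), ih (0 ||| F b), Nat.lor_assoc]
    simp

-- a fold whose skip-condition never fires is the unconditional fold
theorem pv_fold_noif (l : List Nat) (r : Nat) (F : Nat → Nat) (h : ∀ i ∈ l, i ≠ r) : ∀ a : Nat,
    l.foldl (fun m i => if i ≠ r then m ||| F i else m) a = l.foldl (fun m i => m ||| F i) a := by
  induction l with
  | nil => intro a; rfl
  | cons b l ih =>
    intro a
    simp only [List.foldl]
    rw [if_pos (h b (by simp))]
    exact ih (fun i hi => h i (by simp [hi])) _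

-- closed form of A's Nat image for ranks off the board (second loop never skips)
theorem pv_high (r f : Nat) (hr : 8 ≤ r) :
    pvA r f =
      (((List.range 8).foldl (fun m i => if i ≠ f then m ||| (1 <<< i) else m) 0) <<< (r * 8))
        ||| ((List.range 8).foldl (fun m i => m ||| (1 <<< (i * 8 + f))) 0) := by
  unfold pvA
  rw [pv_fold_noif (List.range 8) r (fun i => 1 <<< (i * 8 + f))
    (by intro i hi; simp [List.mem_range] at hi; omega)]
  rw [pv_foldl_or_init]
  congr 1
  conv_lhs => rw [show (0 : Nat) = 0 <<< (r * 8) from (Nat.zero_shiftLeft _).symm]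
  rw [pv_rowfold]

-- B's full cross mask contains the square's own bit
theorem pv_e3 (r f : Nat) (hf : f < 8) : (pvX r f).testBit (r * 8 + f) = true := by
  simp only [pvX, Nat.testBit_lor, Nat.testBit_shiftLeft, pv255, pvC,
    Bool.or_eq_true, Bool.and_eq_true, decide_eq_true_eq, ge_iff_le]
  omega

-- Nat-level equivalence of the two computations
theorem pv_key (r f : Nat) (hf : f < 8) :
    pvA r f = pvX r f - (pvX r f &&& (1 <<< (r * 8 + f))) := by
  have hand : pvX r f &&& (1 <<< (r * 8 + f)) = 1 <<< (r * 8 + f) := by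
    rw [Nat.one_shiftLeft, Nat.and_two_pow, pv_e3 r f hf]; simp
  rw [hand]
  rcases Nat.lt_or_ge r 8 with hr | hr
  · interval_cases r <;> interval_cases f <;> decide
  · have hrowlit : (List.range 8).foldl (fun m i => if i ≠ f then m ||| (1 <<< i) else m) 0
        = 255 - (1 <<< f) := by interval_cases f <;> decide
    have hcollit : (List.range 8).foldl (fun m i => m ||| (1 <<< (i * 8 + f))) 0
        = 0x0101010101010101 <<< f := by interval_cases f <;> decide
    rw [pv_high r f hr, hrowlit, hcollit]
    have hclt : (0x0101010101010101 <<< f) < 2 ^ (r * 8) := by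
      calc (0x0101010101010101 <<< f) < 2 ^ 64 := by interval_cases f <;> decide
        _ ≤ 2 ^ (r * 8) := Nat.pow_le_pow_right (by norm_num) (by omega)
    rw [pv_or_add _ _ (pv_shift_and_eq_zero _ _ _ hclt), pvX,
      pv_or_add _ _ (pv_shift_and_eq_zero _ _ _ hclt)]
    rw [Nat.shiftLeft_eq (255 - (1 <<< f)), Nat.shiftLeft_eq 255, Nat.one_shiftLeft,
      Nat.one_shiftLeft, pow_add, Nat.sub_mul]
    have hx : (2 : Nat) ^ f ≤ 255 := by
      calc (2 : Nat) ^ f ≤ 2 ^ 7 := Nat.pow_le_pow_right (by norm_num) (by omega)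
        _ ≤ 255 := by norm_num
    have hmul := Nat.mul_le_mul_right (2 ^ (r * 8)) hx
    have hcomm : (2 : Nat) ^ (r * 8) * 2 ^ f = 2 ^ f * 2 ^ (r * 8) := Nat.mul_comm _ _
    rw [hcomm]
    omega

-- bridge: Python-int & with a complement, on nonnegative operands
theorem pv_band_not (X Y : Nat) :
    PySem.Int.band (X : Int) (Int.not (Y : Int)) = ((X - (X &&& Y) : Nat) : Int) := by
  show PySem.Int.band _ (Int.not (Int.ofNat Y)) = _
  simp [PySem.Int.band, Int.not]

-- the two loop shapes of port A, carried from Int to Nat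
theorem pv_fold1 (l : List Nat) (t u : Nat) (acc : Nat) :
    l.foldl (fun (m : Int) (i : Nat) =>
        if (i : Int) ≠ ((t : Nat) : Int) then
          PySem.Int.bor m ((1 : Int) <<< (((u : Nat) : Int) * 8 + (i : Int)).toNat) else m)
      ((acc : Nat) : Int)
      = ((l.foldl (fun m i => if i ≠ t then m ||| (1 <<< (u * 8 + i)) else m) acc : Nat) : Int) := by
  induction l generalizing acc with
  | nil => rfl
  | cons a l ih =>
    simp only [List.foldl]
    have hK : (((u : Nat) : Int) * 8 + ((a : Nat) : Int)).toNat = u * 8 + a := by omega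
    by_cases h : a = t
    · rw [if_neg (by simp [h]), if_neg (by simp [h])]; exact ih acc
    · rw [if_pos (by simp [h]), if_pos h, hK,
        show ((1 : Int)) = ((1 : Nat) : Int) from rfl,
        show (((1 : Nat) : Int) <<< (u * 8 + a)) = ((1 <<< (u * 8 + a) : Nat) : Int) from rfl,
        PySem.Int.bor_natCast]
      exact ih _

theorem pv_fold2 (l : List Nat) (t u : Nat) (acc : Nat) :
    l.foldl (fun (m : Int) (i : Nat) =>
        if (i : Int) ≠ ((t : Nat) : Int) then
          PySem.Int.bor m ((1 : Int) <<< ((i : Int) * 8 + ((u : Nat) : Int)).toNat) else m)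
      ((acc : Nat) : Int)
      = ((l.foldl (fun m i => if i ≠ t then m ||| (1 <<< (i * 8 + u)) else m) acc : Nat) : Int) := by
  induction l generalizing acc with
  | nil => rfl
  | cons a l ih =>
    simp only [List.foldl]
    have hK : (((a : Nat) : Int) * 8 + ((u : Nat) : Int)).toNat = a * 8 + u := by omega
    by_cases h : a = t
    · rw [if_neg (by simp [h]), if_neg (by simp [h])]; exact ih acc
    · rw [if_pos (by simp [h]), if_pos h, hK,
        show ((1 : Int)) = ((1 : Nat) : Int) from rfl,
        show (((1 : Nat) : Int) <<< (a * 8 + u)) = ((1 <<< (a * 8 + u) : Nat) : Int) from rfl,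
        PySem.Int.bor_natCast]
      exact ih _

-- bridge for port A: on a nonnegative square it computes (the cast of) pvA
theorem pv_bridgeA (n : Nat) :
    rook_occupancy_mask (n : Int) = ((pvA (n / 8) (n % 8) : Nat) : Int) := by
  have hdiv : PySem.Int.floordiv (n : Int) 8 = ((n / 8 : Nat) : Int) := by
    exact_mod_cast PySem.Int.floordiv_natCast n 8
  have hmod : PySem.Int.mod (n : Int) 8 = ((n % 8 : Nat) : Int) := by
    exact_mod_cast PySem.Int.mod_natCast n 8
  unfold rook_occupancy_mask
  simp only [hdiv, hmod]
  rw [show (0 : Int) = ((0 : Nat) : Int) from rfl,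
    pv_fold1 (List.range 8) (n % 8) (n / 8) 0, pv_fold2 (List.range 8) (n / 8) (n % 8) _]
  rfl

-- bridge for port B: on a nonnegative square it computes (the cast of) the masked cross
theorem pv_bridgeB (n : Nat) :
    rook_occupancy_mask_alt (n : Int) =
      ((pvX (n / 8) (n % 8) - (pvX (n / 8) (n % 8) &&& (1 <<< n)) : Nat) : Int) := by
  have hdiv : PySem.Int.floordiv (n : Int) 8 = ((n / 8 : Nat) : Int) := by
    exact_mod_cast PySem.Int.floordiv_natCast n 8
  have hmod : PySem.Int.mod (n : Int) 8 = ((n % 8 : Nat) : Int) := by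
    exact_mod_cast PySem.Int.mod_natCast n 8
  have ht : (((n / 8 : Nat) : Int) * 8).toNat = (n / 8) * 8 := by omega
  have ht2 : ((n % 8 : Nat) : Int).toNat = n % 8 := by omega
  have ht3 : ((n : Int)).toNat = n := by omega
  simp only [rook_occupancy_mask_alt, hdiv, hmod, ht, ht2, ht3, pvX,
    show ((0xFF : Int)) = ((255 : Nat) : Int) from rfl,
    show ((0x0101010101010101 : Int)) = ((0x0101010101010101 : Nat) : Int) from rfl,
    show ((1 : Int)) = ((1 : Nat) : Int) from rfl,
    show ∀ m k : Nat, ((m : Int) <<< k) = ((m <<< k : Nat) : Int) from fun _ _ => rfl,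
    PySem.Int.bor_natCast, pv_band_not]

-- ===== VERDICT (by name: the statement is the Claim_ definition above) =====
theorem rook_occupancy_mask_spec : Claim_equal_rook_occupancy_mask := by
  intro square _ hpre
  unfold Spec_rook_occupancy_mask
  obtain ⟨n, rfl⟩ : ∃ n : Nat, square = (n : Int) :=
    ⟨square.toNat, by unfold Pre_rook_occupancy_mask at hpre; omega⟩
  rw [pv_bridgeA, pv_bridgeB]
  have hkey := pv_key (n / 8) (n % 8) (Nat.mod_lt n (by norm_num))
  rw [show (n / 8) * 8 + n % 8 = n from by omega] at hkey
  exact_mod_cast hkey
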